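-- pv_equiv track=rewrite | github.com/nhathuynguyen19/bai-tap-ctdltt | baitap1.py | kiemTraDoiXung
-- ===== SOURCE A (Python) =====
-- def kiemTraDoiXung(A, head, last):
--     if head < last:
--         if A[head] != A[last]:
--             return False
--         else:
--             return kiemTraDoiXung(A, head + 1, last - 1)
--     else:
--         return True
-- ===== SOURCE B (Python) =====
-- def kiemTraDoiXung(A, head, last):
--     n = (last - head + 1) // 2
--     return all(A[head + i] == A[last - i] for i in range(n))
-- ===== Notes on version B (the rewrite author's own statement) =====
-- stated objective: alternative
-- what changed: Replaces the pairwise recursion with a closed-form comparison count (last-head+1)//2 and a single all() over range(n) comparing mirrored indices.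
import Mathlib
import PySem

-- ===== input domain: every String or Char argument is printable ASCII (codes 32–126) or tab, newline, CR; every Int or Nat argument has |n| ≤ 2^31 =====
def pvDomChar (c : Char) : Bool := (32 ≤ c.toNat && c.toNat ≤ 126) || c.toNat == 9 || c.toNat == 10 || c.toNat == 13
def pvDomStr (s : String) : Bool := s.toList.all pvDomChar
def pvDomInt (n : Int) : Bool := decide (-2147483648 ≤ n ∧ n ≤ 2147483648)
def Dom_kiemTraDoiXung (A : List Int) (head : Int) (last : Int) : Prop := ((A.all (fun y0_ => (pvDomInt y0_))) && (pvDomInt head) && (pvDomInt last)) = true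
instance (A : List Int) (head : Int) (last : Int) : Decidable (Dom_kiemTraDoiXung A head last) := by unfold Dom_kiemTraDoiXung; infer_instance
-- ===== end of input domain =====

-- B replaces the pairwise recursion with a closed-form comparison count and a
-- single all() over range(n) comparing mirrored indices (objective: alternative).

-- ===== PORT A =====
def kiemTraDoiXung (A : List Int) (head : Int) (last : Int) : Bool :=
  if head < last then
    -- A[head] / A[last]: IndexError (none) inputs are excluded by Pre_
    match PySem.List.pyGet? A head, PySem.List.pyGet? A last with
    | some x, some y => if x ≠ y then false else kiemTraDoiXung A (head + 1) (last - 1)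
    | _, _ => false
  else true
termination_by (last - head).toNat
decreasing_by omega

-- ===== PORT B =====
def kiemTraDoiXung_alt (A : List Int) (head : Int) (last : Int) : Bool :=
  let n := PySem.Int.floordiv (last - head + 1) 2
  (PySem.List.pyRange 0 n 1).all (fun i =>
    match PySem.List.pyGet? A (head + i) with
    | none => false
    | some x =>
      match PySem.List.pyGet? A (last - i) with
      | none => false
      | some y => x == y)

-- ===== PRECONDITION & SPEC =====
-- Pre_ excludes exactly the inputs where Python A raises IndexError: head < last
-- with head below -len(A) or last beyond the end.
def Pre_kiemTraDoiXung (A : List Int) (head : Int) (last : Int) : Prop :=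
  head < last → (-(A.length : Int) ≤ head ∧ last < (A.length : Int))
instance (A : List Int) (head : Int) (last : Int) : Decidable (Pre_kiemTraDoiXung A head last) := by unfold Pre_kiemTraDoiXung; infer_instance
def pvWitness_kiemTraDoiXung : List Int × Int × Int := ([1, 2, 2, 1], 0, 3)

def Spec_kiemTraDoiXung (A : List Int) (head : Int) (last : Int) (out : Bool) : Prop := out = kiemTraDoiXung_alt A head last
instance (A : List Int) (head : Int) (last : Int) (out : Bool) : Decidable (Spec_kiemTraDoiXung A head last out) := by unfold Spec_kiemTraDoiXung; infer_instance

-- ===== CLAIM (what is proved, stated in full; the proofs are below) =====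
def Claim_equal_kiemTraDoiXung : Prop := ∀ (A : List Int) (head : Int) (last : Int), Dom_kiemTraDoiXung A head last → Pre_kiemTraDoiXung A head last → Spec_kiemTraDoiXung A head last (kiemTraDoiXung A head last)

-- ===== LEMMAS AND PROOFS =====

theorem alt_unfold (A : List Int) (head last : Int) :
    kiemTraDoiXung_alt A head last
      = (PySem.List.pyRange 0 (PySem.Int.floordiv (last - head + 1) 2) 1).all (fun i =>
          match PySem.List.pyGet? A (head + i) with
          | none => false
          | some x =>
            match PySem.List.pyGet? A (last - i) with
            | none => false
            | some y => x == y) := rfl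

theorem pyGet?_some_of_bounds (A : List Int) (i : Int)
    (h1 : -(A.length : Int) ≤ i) (h2 : i < (A.length : Int)) :
    ∃ x, PySem.List.pyGet? A i = some x := by
  cases hg : PySem.List.pyGet? A i with
  | some x => exact ⟨x, rfl⟩
  | none =>
    rw [PySem.List.pyGet?_eq_none_iff] at hg
    exact absurd (by simp [PySem.Raise.InRange]; omega) hg

theorem kiemTraDoiXung_main (k : Nat) : ∀ (A : List Int) (head last : Int),
    (last - head).toNat ≤ k → Pre_kiemTraDoiXung A head last →
    kiemTraDoiXung A head last = kiemTraDoiXung_alt A head last := by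
  induction k with
  | zero =>
    intro A head last hk _
    have hnl : ¬ head < last := by omega
    rw [kiemTraDoiXung, if_neg hnl, alt_unfold]
    have hn : PySem.Int.floordiv (last - head + 1) 2 ≤ 0 := by
      rw [PySem.Int.floordiv_eq_ediv_of_pos (by omega)]; omega
    rw [PySem.List.pyRange_one_eq_nil hn]; rfl
  | succ k ih =>
    intro A head last hk hpre
    by_cases hlt : head < last
    · obtain ⟨h1, h2⟩ := hpre hlt
      obtain ⟨x, hx⟩ := pyGet?_some_of_bounds A head (by omega) (by omega)
      obtain ⟨y, hy⟩ := pyGet?_some_of_bounds A last (by omega) (by omega)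
      have hn1 : (1 : Int) ≤ PySem.Int.floordiv (last - head + 1) 2 := by
        rw [PySem.Int.floordiv_eq_ediv_of_pos (by omega)]; omega
      rw [kiemTraDoiXung, if_pos hlt, hx, hy, alt_unfold]
      show (if x ≠ y then false else kiemTraDoiXung A (head + 1) (last - 1)) = _
      rw [PySem.List.pyRange_one_cons (by omega)]
      simp only [List.all_cons, add_zero, sub_zero, hx, hy]
      by_cases hxy : x = y
      · subst hxy
        simp only [ne_eq, not_true_eq_false, if_false, BEq.rfl, Bool.true_and]
        have hrec := ih A (head + 1) (last - 1) (by omega)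
          (by intro h; constructor <;> omega)
        rw [hrec, alt_unfold]
        have hshift : PySem.Int.floordiv (last - 1 - (head + 1) + 1) 2
            = PySem.Int.floordiv (last - head + 1) 2 - 1 := by
          rw [PySem.Int.floordiv_eq_ediv_of_pos (by omega),
              PySem.Int.floordiv_eq_ediv_of_pos (by omega)]; omega
        rw [hshift]
        rw [PySem.List.pyRange_one, PySem.List.pyRange_one]
        have hlen : (PySem.Int.floordiv (last - head + 1) 2 - (0 + 1)).toNat
            = (PySem.Int.floordiv (last - head + 1) 2 - 1 - 0).toNat := by omega
        rw [hlen]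
        simp only [List.all_map]
        congr 1
        funext m
        simp only [Function.comp_apply]
        have e2 : head + (0 + 1 + (m : Int)) = head + 1 + (0 + (m : Int)) := by ring
        have e3 : last - (0 + 1 + (m : Int)) = last - 1 - (0 + (m : Int)) := by ring
        rw [e2, e3]
      · have : (x == y) = false := by simp [hxy]
        simp [hxy, this]
    · rw [kiemTraDoiXung, if_neg hlt, alt_unfold]
      have hn : PySem.Int.floordiv (last - head + 1) 2 ≤ 0 := by
        rw [PySem.Int.floordiv_eq_ediv_of_pos (by omega)]; omega
      rw [PySem.List.pyRange_one_eq_nil hn]; rfl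

-- ===== VERDICT (by name: the statement is the Claim_ definition above) =====
theorem kiemTraDoiXung_spec : Claim_equal_kiemTraDoiXung := by
  intro A head last _ hpre
  exact kiemTraDoiXung_main (last - head).toNat A head last le_rfl hpre
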